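-- pv_equiv track=rewrite | github.com/Vinamra-tech/EchoCrypt | logic/main/try.py | substitute_decrypt
-- ===== SOURCE A (Python) =====
-- def create_substitution_mapping(key):
--     printable_chars = [chr(i) for i in range(32, 127)]
--     substitution = {original: substituted for original, substituted in zip(printable_chars, key)}
--     return substitution
--
-- def substitute_decrypt(cipher_text, key,n=10):
--     current_key = key
--     substitution_history = []
--
--     for _ in range(n):
--         substitution = create_substitution_mapping(current_key)
--         substitution_history.append(substitution)
--             # Transform the key the same way as during encryption
--         current_key = ''.join([substitution.get(c, c) for c in current_key])
--
--         # Apply reverse substitutions in reverse order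
--     plain_text = cipher_text
--     for substitution in reversed(substitution_history):
--         inverse_substitution = {v: k for k, v in substitution.items()}
--         plain_text = ''.join([inverse_substitution.get(c, c) for c in plain_text])
--     return plain_text
-- ===== SOURCE B (Python) =====
-- def substitute_decrypt(cipher_text, key, n=10):
--     # Compose the n inverse substitutions into a single table, then apply it once.
--     printable = [chr(i) for i in range(32, 127)]
--     chars = sorted(set(cipher_text) | set(key) | set(printable))
--     table = {c: c for c in chars}
--     current_key = key
--     for _ in range(n):
--         substitution = dict(zip(printable, current_key))
--         inverse = {v: k for k, v in substitution.items()}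
--         table = {c: table[inverse.get(c, c)] for c in chars}
--         current_key = ''.join(substitution.get(c, c) for c in current_key)
--     return ''.join(table[c] for c in cipher_text)
-- ===== Notes on version B (the rewrite author's own statement) =====
-- stated objective: alternative
-- what changed: Instead of storing all n substitution dicts and rewriting the whole cipher text n times in reverse, B composes the n inverse substitutions into a single lookup table while evolving the key, and applies that table to the cipher text once; intended as faster (one pass over cipher_text instead of n; a timing run measured 2.31x at the largest size both finished but could not confirm it at its cap).
import Mathlib
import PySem

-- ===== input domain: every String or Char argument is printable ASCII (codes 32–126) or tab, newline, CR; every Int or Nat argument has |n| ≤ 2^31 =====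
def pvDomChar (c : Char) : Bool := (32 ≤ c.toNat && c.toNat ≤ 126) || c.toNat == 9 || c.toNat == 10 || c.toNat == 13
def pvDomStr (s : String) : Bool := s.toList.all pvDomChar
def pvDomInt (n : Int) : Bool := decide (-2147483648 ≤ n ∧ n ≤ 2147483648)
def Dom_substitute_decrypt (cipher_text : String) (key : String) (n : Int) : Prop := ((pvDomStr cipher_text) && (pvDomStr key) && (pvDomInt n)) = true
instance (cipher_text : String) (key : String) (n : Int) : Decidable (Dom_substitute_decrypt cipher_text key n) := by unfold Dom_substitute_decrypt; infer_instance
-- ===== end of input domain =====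

-- B composes the n inverse substitutions into one lookup table and applies it to the cipher text once (one pass over cipher_text instead of n).

-- ===== PORT A =====
-- [chr(i) for i in range(32, 127)] (the same list literal occurs in both Pythons)
def printableChars : List Char := (PySem.List.pyRange 32 127 1).map (fun i => Char.ofNat i.toNat)

def create_substitution_mapping (key : String) : PySem.Dict Char Char :=
  (printableChars.zip key.toList).foldl (fun d p => d.insert p.1 p.2) PySem.Dict.empty

def substitute_decrypt (cipher_text : String) (key : String) (n : Int) : String :=
  let st := (PySem.List.pyRange 0 n 1).foldl
    (fun (st : List (PySem.Dict Char Char) × String) _ =>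
      let substitution := create_substitution_mapping st.2
      (st.1 ++ [substitution],
       String.ofList (st.2.toList.map (fun c => substitution.getD c c))))
    ([], key)
  st.1.reverse.foldl
    (fun (plain : String) substitution =>
      let inverse := substitution.items.foldl (fun d p => d.insert p.2 p.1) PySem.Dict.empty
      String.ofList (plain.toList.map (fun c => inverse.getD c c)))
    cipher_text

-- ===== PORT B =====
-- table[inverse.get(c, c)] is ported as getD with the key itself as default: the key is
-- always present in table (table's keys are exactly chars, and chars is closed under the
-- inverse lookup — proved in pv_inv_getD_mem below), so the default is never used.
def substitute_decrypt_alt (cipher_text : String) (key : String) (n : Int) : String :=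
  let chars : List Char :=
    PySem.List.sorted
      (PySem.Set.union (PySem.Set.union (PySem.Set.ofList cipher_text.toList) key.toList) printableChars)
      (fun c => c) false
  let st := (PySem.List.pyRange 0 n 1).foldl
    (fun (st : PySem.Dict Char Char × String) _ =>
      let substitution := (printableChars.zip st.2.toList).foldl (fun d p => d.insert p.1 p.2) PySem.Dict.empty
      let inverse := substitution.items.foldl (fun d p => d.insert p.2 p.1) PySem.Dict.empty
      let table := chars.foldl (fun d c => d.insert c (st.1.getD (inverse.getD c c) (inverse.getD c c))) PySem.Dict.empty
      (table, String.ofList (st.2.toList.map (fun c => substitution.getD c c))))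
    (chars.foldl (fun d c => d.insert c c) PySem.Dict.empty, key)
  String.ofList (cipher_text.toList.map (fun c => st.1.getD c c))

-- ===== PRECONDITION & SPEC =====
def Spec_substitute_decrypt (cipher_text : String) (key : String) (n : Int) (out : String) : Prop := out = substitute_decrypt_alt cipher_text key n
instance (cipher_text : String) (key : String) (n : Int) (out : String) : Decidable (Spec_substitute_decrypt cipher_text key n out) := by unfold Spec_substitute_decrypt; infer_instance

-- ===== CLAIM (what is proved, stated in full; the proofs are below) =====
def Claim_equal_substitute_decrypt : Prop := ∀ (cipher_text : String) (key : String) (n : Int), Dom_substitute_decrypt cipher_text key n → Spec_substitute_decrypt cipher_text key n (substitute_decrypt cipher_text key n)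

-- ===== LEMMAS AND PROOFS =====

-- the inverse dict {v: k for k, v in sub.items()}
def pvInv (sub : PySem.Dict Char Char) : PySem.Dict Char Char :=
  sub.items.foldl (fun d p => d.insert p.2 p.1) PySem.Dict.empty

-- the composed inverse map of a substitution history (last substitution inverted first)
def pvG (hist : List (PySem.Dict Char Char)) (c : Char) : Char :=
  hist.foldr (fun sub x => (pvInv sub).getD x x) c

-- named copies of the two loop bodies (definitionally equal to the lambdas in the ports)
def pvStepA (st : List (PySem.Dict Char Char) × String) (_ : Int) :
    List (PySem.Dict Char Char) × String :=
  let substitution := create_substitution_mapping st.2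
  (st.1 ++ [substitution],
   String.ofList (st.2.toList.map (fun c => substitution.getD c c)))

def pvStepB (chars : List Char) (st : PySem.Dict Char Char × String) (_ : Int) :
    PySem.Dict Char Char × String :=
  let substitution := create_substitution_mapping st.2
  let inverse := pvInv substitution
  (chars.foldl (fun d c => d.insert c (st.1.getD (inverse.getD c c) (inverse.getD c c))) PySem.Dict.empty,
   String.ofList (st.2.toList.map (fun c => substitution.getD c c)))

lemma pv_getD_build (L : List Char) (f : Char → Char) (d0 : PySem.Dict Char Char) (c d : Char) :
    (L.foldl (fun acc x => acc.insert x (f x)) d0).getD c d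
      = if c ∈ L then f c else d0.getD c d := by
  induction L generalizing d0 with
  | nil => simp
  | cons a t ih =>
    simp only [List.foldl_cons, ih, List.mem_cons]
    by_cases h1 : c ∈ t
    · simp [h1]
    · by_cases h2 : c = a <;> simp [h1, h2, PySem.Dict.getD_insert]

lemma pv_values_inv_subset (l : List (Char × Char)) (d0 : PySem.Dict Char Char) (w : Char)
    (h : w ∈ (l.foldl (fun d p => d.insert p.2 p.1) d0).values) :
    w ∈ d0.values ∨ w ∈ l.map (·.1) := by
  induction l generalizing d0 with
  | nil => left; simpa using h
  | cons p t ih =>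
    simp only [List.foldl_cons] at h
    rcases ih _ h with h' | h'
    · rcases PySem.Dict.mem_values_insert _ _ _ _ h' with h'' | h''
      · right; simp [h'']
      · left; exact h''
    · right; simp [h']

lemma pv_keys_sub_subset (k : String) (c : Char)
    (h : c ∈ (create_substitution_mapping k).keys) : c ∈ printableChars := by
  unfold create_substitution_mapping at h
  rw [PySem.Dict.keys_foldl_insert_key (printableChars.zip k.toList) (·.1) (fun _ p => p.2)
      PySem.Dict.empty] at h
  simp only [PySem.Dict.keys_empty, PySem.Set.update_nil_left, PySem.Set.mem_ofList,
    List.mem_map] at h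
  obtain ⟨⟨x, y⟩, hp, rfl⟩ := h
  exact (List.of_mem_zip hp).1

lemma pv_inv_getD_mem (k : String) (c : Char) :
    (pvInv (create_substitution_mapping k)).getD c c = c ∨
    (pvInv (create_substitution_mapping k)).getD c c ∈ printableChars := by
  rw [PySem.Dict.getD_eq_get?_getD]
  cases hg : (pvInv (create_substitution_mapping k)).get? c with
  | none => left; rfl
  | some v =>
    right
    have hm := PySem.Dict.mem_items_of_get?_eq_some _ hg
    have hv : v ∈ (pvInv (create_substitution_mapping k)).values := by
      simp only [PySem.Dict.values]
      exact List.mem_map_of_mem hm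
    unfold pvInv at hv
    rcases pv_values_inv_subset _ _ _ hv with h | h
    · rw [show PySem.Dict.empty.values = ([] : List Char) from rfl] at h
      cases h
    · refine pv_keys_sub_subset k v ?_
      simpa [PySem.Dict.keys] using h

lemma pv_apply_hist (hist : List (PySem.Dict Char Char)) (s : String) :
    hist.foldr (fun sub plain => String.ofList (plain.toList.map (fun c => (pvInv sub).getD c c))) s
      = String.ofList (s.toList.map (pvG hist)) := by
  induction hist generalizing s with
  | nil =>
    rw [show pvG [] = fun c => c from rfl]
    simp
  | cons sub t ih =>
    simp only [List.foldr_cons, ih]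
    rw [show pvG (sub :: t) = fun c => (pvInv sub).getD (pvG t c) (pvG t c) from rfl]
    simp [List.map_map, Function.comp_def]

lemma pv_loop_inv (l : List Int) (chars : List Char)
    (hp : ∀ c ∈ printableChars, c ∈ chars)
    (hist : List (PySem.Dict Char Char)) (table : PySem.Dict Char Char) (ckey : String)
    (ht : ∀ c ∈ chars, table.getD c c = pvG hist c) :
    (l.foldl (pvStepB chars) (table, ckey)).2 = (l.foldl pvStepA (hist, ckey)).2 ∧
    ∀ c ∈ chars,
      (l.foldl (pvStepB chars) (table, ckey)).1.getD c c
        = pvG ((l.foldl pvStepA (hist, ckey)).1) c := by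
  induction l generalizing hist table ckey with
  | nil => exact ⟨rfl, ht⟩
  | cons a t ih =>
    simp only [List.foldl_cons]
    have hstepA : pvStepA (hist, ckey) a
        = (hist ++ [create_substitution_mapping ckey],
           String.ofList (ckey.toList.map (fun c => (create_substitution_mapping ckey).getD c c))) := rfl
    have hstepB : pvStepB chars (table, ckey) a
        = (chars.foldl (fun d c => d.insert c
              (table.getD ((pvInv (create_substitution_mapping ckey)).getD c c)
                          ((pvInv (create_substitution_mapping ckey)).getD c c))) PySem.Dict.empty,
           String.ofList (ckey.toList.map (fun c => (create_substitution_mapping ckey).getD c c))) := rfl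
    rw [hstepA, hstepB]
    apply ih
    intro c hc
    have hb := pv_getD_build chars
      (fun c => table.getD ((pvInv (create_substitution_mapping ckey)).getD c c)
                           ((pvInv (create_substitution_mapping ckey)).getD c c))
      PySem.Dict.empty c c
    simp only [hc, if_true] at hb
    rw [hb]
    have hx : (pvInv (create_substitution_mapping ckey)).getD c c ∈ chars := by
      rcases pv_inv_getD_mem ckey c with h | h
      · rw [h]; exact hc
      · exact hp _ h
    rw [ht _ hx]
    simp [pvG, List.foldr_append]

-- ===== VERDICT (by name: the statement is the Claim_ definition above) =====
theorem substitute_decrypt_spec : Claim_equal_substitute_decrypt := by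
  intro ct k n _
  unfold Spec_substitute_decrypt
  have hA : substitute_decrypt ct k n
      = ((PySem.List.pyRange 0 n 1).foldl pvStepA ([], k)).1.reverse.foldl
          (fun plain sub => String.ofList (plain.toList.map (fun c => (pvInv sub).getD c c))) ct := rfl
  set chars : List Char :=
    PySem.List.sorted
      (PySem.Set.union (PySem.Set.union (PySem.Set.ofList ct.toList) k.toList) printableChars)
      (fun c => c) false with hchars
  have hB : substitute_decrypt_alt ct k n
      = String.ofList (ct.toList.map (fun c =>
          ((PySem.List.pyRange 0 n 1).foldl (pvStepB chars)
            (chars.foldl (fun d c => d.insert c c) PySem.Dict.empty, k)).1.getD c c)) := rfl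
  have hp : ∀ c ∈ printableChars, c ∈ chars := by
    intro c h
    rw [hchars, PySem.List.mem_sorted]
    exact (PySem.Set.mem_union _ _ _).mpr (Or.inr h)
  have hct : ∀ c ∈ ct.toList, c ∈ chars := by
    intro c h
    rw [hchars, PySem.List.mem_sorted]
    exact (PySem.Set.mem_union _ _ _).mpr (Or.inl ((PySem.Set.mem_union _ _ _).mpr
      (Or.inl ((PySem.Set.mem_ofList _ _).mpr h))))
  have hinit : ∀ c ∈ chars, (chars.foldl (fun d c => d.insert c c) PySem.Dict.empty).getD c c
      = pvG [] c := by
    intro c hc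
    have := pv_getD_build chars (fun y => y) PySem.Dict.empty c c
    simp only [hc, if_true] at this
    simpa [pvG] using this
  obtain ⟨hkey, htab⟩ := pv_loop_inv (PySem.List.pyRange 0 n 1) chars hp [] _ k hinit
  rw [hA, hB, List.foldl_reverse]
  have := pv_apply_hist (((PySem.List.pyRange 0 n 1).foldl pvStepA ([], k)).1) ct
  rw [show (fun (x : PySem.Dict Char Char) (y : String) =>
        String.ofList (y.toList.map (fun c => (pvInv x).getD c c)))
      = (fun sub plain => String.ofList (plain.toList.map (fun c => (pvInv sub).getD c c))) from rfl,
    this]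
  refine congrArg String.ofList ?_
  apply List.map_congr_left
  intro c hc
  exact (htab c (hct c hc)).symm
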